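-- pv_equiv track=rewrite | github.com/anjli01/Python-Functions | 27.py | get_index_wise_product_of_tuple_values
-- ===== SOURCE A (Python) =====
-- from typing import List, Set, Tuple
-- from typing import List, Any, Tuple, TypeVar, Union
-- from typing import List, Dict, Any, Hashable, Tuple
--
-- def get_index_wise_product_of_tuple_values(data: Dict[Any, Tuple]) -> Tuple:
--     """Calculates the product of tuple elements at each index across all values."""
--     if not data:
--         return ()
--
--     # zip(*data.values()) transposes the tuples
--     # e.g., ((5,6,1), (8,3,2)) -> ((5,8), (6,3), (1,2))
--     products = []
--     for zipped_values in zip(*data.values()):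
--         product = 1
--         for val in zipped_values:
--             product *= val
--         products.append(product)
--     return tuple(products)
-- ===== SOURCE B (Python) =====
-- def get_index_wise_product_of_tuple_values(data):
--     """Row-major fold: multiply each row into a 1-initialized accumulator of
--     length min(len(t)), instead of transposing with zip and reducing columns."""
--     if not data:
--         return ()
--     vals = list(data.values())
--     n = min(len(t) for t in vals)
--     products = [1] * n
--     for t in vals:
--         products = [products[i] * t[i] for i in range(n)]
--     return tuple(products)
-- ===== Notes on version B (the rewrite author's own statement) =====
-- stated objective: alternative
-- what changed: Replaces the zip-based column transposition followed by per-column products with a single row-major fold that multiplies each tuple elementwise into a ones-initialized accumulator of the minimum tuple length.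
import Mathlib
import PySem

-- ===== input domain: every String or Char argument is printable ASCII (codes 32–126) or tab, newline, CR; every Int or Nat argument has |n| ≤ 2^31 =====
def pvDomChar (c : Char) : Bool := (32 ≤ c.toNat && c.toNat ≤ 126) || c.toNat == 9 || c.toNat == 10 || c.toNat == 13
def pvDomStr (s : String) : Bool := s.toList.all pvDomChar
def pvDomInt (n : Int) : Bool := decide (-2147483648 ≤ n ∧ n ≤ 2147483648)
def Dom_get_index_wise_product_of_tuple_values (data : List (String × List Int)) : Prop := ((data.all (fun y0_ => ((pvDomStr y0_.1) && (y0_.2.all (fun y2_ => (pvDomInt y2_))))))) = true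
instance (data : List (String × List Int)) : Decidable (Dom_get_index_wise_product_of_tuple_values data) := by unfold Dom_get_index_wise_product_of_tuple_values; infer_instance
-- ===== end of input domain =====

-- B replaces A's zip(*values) column transposition + per-column products by a row-major
-- fold of every tuple into a [1]*min_len accumulator (alternative decomposition; same cost).

-- ===== PORT A =====
-- termination lemmas for zipCols (cited by name in decreasing_by)
theorem pvTailLenSum_le (rows : List (List Int)) :
    ((rows.map List.tail).map List.length).sum ≤ (rows.map List.length).sum := by
  induction rows with
  | nil => simp
  | cons a l ih =>
    simp only [List.map_cons, List.sum_cons, List.length_tail]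
    omega

theorem pvTailLenSum_lt (rows : List (List Int)) (hne : rows ≠ [])
    (hall : ∀ r ∈ rows, r ≠ []) :
    ((rows.map List.tail).map List.length).sum < (rows.map List.length).sum := by
  cases rows with
  | nil => exact absurd rfl hne
  | cons a l =>
    have ha : a ≠ [] := hall a (by simp)
    have hlen : 0 < a.length := List.length_pos_iff.mpr ha
    have := pvTailLenSum_le l
    simp only [List.map_cons, List.sum_cons, List.length_tail]
    omega

-- literal port of `zip(*rows)`: take heads while every row is nonempty
def zipCols (rows : List (List Int)) : List (List Int) :=
  if h : rows ≠ [] ∧ rows.all (fun r => !r.isEmpty) then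
    (rows.map (fun r => r.headD 0)) :: zipCols (rows.map List.tail)
  else []
termination_by (rows.map List.length).sum
decreasing_by
  simp only [List.map_subtype, List.unattach_attach]
  exact pvTailLenSum_lt rows h.1 (by
    intro r hr
    have := List.all_eq_true.mp h.2 r hr
    simpa [List.isEmpty_iff] using this)

def get_index_wise_product_of_tuple_values (data : List (String × List Int)) : List Int :=
  if data.isEmpty then []
  else (zipCols (data.map Prod.snd)).map (fun col => col.foldl (fun p v => p * v) 1)

-- ===== PORT B =====
-- Python's min over a nonempty list
def pyMinList (l : List Nat) : Nat :=
  match l with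
  | [] => 0
  | x :: xs => xs.foldl min x

def get_index_wise_product_of_tuple_values_alt (data : List (String × List Int)) : List Int :=
  if data.isEmpty then []
  else
    let vals := data.map Prod.snd
    let n := pyMinList (vals.map List.length)
    vals.foldl
      (fun products t => (List.range n).map (fun i => products.getD i 0 * t.getD i 0))
      (List.replicate n 1)

-- ===== PRECONDITION & SPEC =====
def Spec_get_index_wise_product_of_tuple_values (data : List (String × List Int)) (out : List Int) : Prop := out = get_index_wise_product_of_tuple_values_alt data
instance (data : List (String × List Int)) (out : List Int) : Decidable (Spec_get_index_wise_product_of_tuple_values data out) := by unfold Spec_get_index_wise_product_of_tuple_values; infer_instance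

-- ===== CLAIM (what is proved, stated in full; the proofs are below) =====
def Claim_equal_get_index_wise_product_of_tuple_values : Prop := ∀ (data : List (String × List Int)), Dom_get_index_wise_product_of_tuple_values data → Spec_get_index_wise_product_of_tuple_values data (get_index_wise_product_of_tuple_values data)

-- ===== LEMMAS AND PROOFS =====

-- product of column i across rows
def colProd (rows : List (List Int)) (i : Nat) : Int :=
  (rows.map (fun r => r.getD i 0)).foldl (fun p v => p * v) 1

theorem foldl_mul_pull (l : List Int) : ∀ (a x : Int),
    l.foldl (fun p v => p * v) (x * a) = x * l.foldl (fun p v => p * v) a := by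
  induction l with
  | nil => intro a x; simp
  | cons b l ih =>
    intro a x
    simp only [List.foldl_cons]
    rw [mul_assoc, ih]

theorem foldl_min_sub_one (xs : List Nat) : ∀ (x : Nat),
    (xs.map (fun m => m - 1)).foldl min (x - 1) = (xs.foldl min x) - 1 := by
  induction xs with
  | nil => intro x; simp
  | cons b l ih =>
    intro x
    simp only [List.map_cons, List.foldl_cons]
    have : min (x - 1) (b - 1) = min x b - 1 := by omega
    rw [this, ih]

theorem pyMinList_tail (rows : List (List Int)) (h : rows ≠ []) :
    pyMinList ((rows.map List.tail).map List.length) = pyMinList (rows.map List.length) - 1 := by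
  cases rows with
  | nil => exact absurd rfl h
  | cons a l =>
    simp only [List.map_cons, pyMinList, List.length_tail, List.map_map]
    have : (List.map (List.length ∘ List.tail) l) = (l.map List.length).map (fun m => m - 1) := by
      simp [List.map_map, Function.comp_def]
    rw [this, foldl_min_sub_one]

theorem foldl_min_pos (xs : List Nat) : ∀ (x : Nat),
    0 < xs.foldl min x ↔ 0 < x ∧ ∀ y ∈ xs, 0 < y := by
  induction xs with
  | nil => intro x; simp
  | cons b l ih =>
    intro x
    simp only [List.foldl_cons, ih, List.mem_cons]
    constructor
    · rintro ⟨h1, h2⟩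
      refine ⟨by omega, ?_⟩
      rintro y (rfl | hy)
      · omega
      · exact h2 y hy
    · rintro ⟨h1, h2⟩
      refine ⟨by have := h2 b (Or.inl rfl); omega, fun y hy => h2 y (Or.inr hy)⟩

theorem pyMinList_pos_iff (rows : List (List Int)) (h : rows ≠ []) :
    0 < pyMinList (rows.map List.length) ↔ ∀ r ∈ rows, r ≠ [] := by
  cases rows with
  | nil => exact absurd rfl h
  | cons a l =>
    simp only [List.map_cons, pyMinList, foldl_min_pos, List.mem_cons, List.mem_map]
    constructor
    · rintro ⟨h1, h2⟩ r (rfl | hr)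
      · exact List.length_pos_iff.mp h1
      · exact List.length_pos_iff.mp (h2 r.length ⟨r, hr, rfl⟩)
    · intro hall
      refine ⟨List.length_pos_iff.mpr (hall a (Or.inl rfl)), ?_⟩
      rintro y ⟨r, hr, rfl⟩
      exact List.length_pos_iff.mpr (hall r (Or.inr hr))

theorem headD_eq_getD (r : List Int) : r.headD 0 = r.getD 0 0 := by
  cases r <;> simp

theorem tail_getD (r : List Int) (i : Nat) : (List.tail r).getD i 0 = r.getD (i + 1) 0 := by
  cases r <;> simp

theorem zipCols_eq (k : Nat) : ∀ (rows : List (List Int)), rows ≠ [] →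
    pyMinList (rows.map List.length) = k →
    zipCols rows = (List.range k).map (fun i => rows.map (fun r => r.getD i 0)) := by
  induction k with
  | zero =>
    intro rows hne hmin
    rw [zipCols.eq_def]
    have : ¬ (rows.all (fun r => !r.isEmpty) = true) := by
      intro hall
      have : ∀ r ∈ rows, r ≠ [] := by
        intro r hr
        simpa [List.isEmpty_iff] using List.all_eq_true.mp hall r hr
      have := (pyMinList_pos_iff rows hne).mpr this
      omega
    simp [hne, this]
  | succ k ih =>
    intro rows hne hmin
    have hall : ∀ r ∈ rows, r ≠ [] := by
      apply (pyMinList_pos_iff rows hne).mp; omega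
    have hallb : rows.all (fun r => !r.isEmpty) = true := by
      apply List.all_eq_true.mpr
      intro r hr
      simpa [List.isEmpty_iff] using hall r hr
    rw [zipCols.eq_def]
    simp only [hne, hallb, and_self, ne_eq, not_false_eq_true, dif_pos]
    have htne : rows.map List.tail ≠ [] := by simpa using hne
    have htmin : pyMinList ((rows.map List.tail).map List.length) = k := by
      rw [pyMinList_tail rows hne, hmin]
      omega
    rw [ih (rows.map List.tail) htne htmin]
    rw [List.range_succ_eq_map, List.map_cons]
    congr 1
    · exact List.map_congr_left (fun r _ => headD_eq_getD r)
    · rw [List.map_map]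
      apply List.map_congr_left
      intro i _
      simp only [Function.comp_def, List.map_map]
      exact List.map_congr_left (fun r _ => tail_getD r i)

theorem getD_range_map (n : Nat) (f : Nat → Int) (i : Nat) (h : i < n) :
    ((List.range n).map f).getD i 0 = f i := by
  rw [List.getD_eq_getElem _ _ (by simpa using h)]
  simp

theorem range_map_getD (l : List Int) :
    (List.range l.length).map (fun i => l.getD i 0) = l := by
  apply List.ext_getElem
  · simp
  · intro i h1 h2
    simp only [List.getElem_map, List.getElem_range]
    rw [List.getD_eq_getElem _ _ (by simpa using h2)]

theorem foldB (n : Nat) : ∀ (rows : List (List Int)) (acc : List Int), acc.length = n →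
    rows.foldl (fun products t => (List.range n).map (fun i => products.getD i 0 * t.getD i 0)) acc
      = (List.range n).map (fun i => acc.getD i 0 * colProd rows i) := by
  intro rows
  induction rows with
  | nil =>
    intro acc hlen
    simp only [List.foldl_nil, colProd, List.map_nil, List.foldl_nil, mul_one]
    rw [← hlen, range_map_getD]
  | cons t rows ih =>
    intro acc hlen
    simp only [List.foldl_cons]
    rw [ih _ (by simp)]
    apply List.map_congr_left
    intro i hi
    have hi' : i < n := List.mem_range.mp hi
    rw [getD_range_map n _ i hi']
    have hcol : colProd (t :: rows) i = t.getD i 0 * colProd rows i := by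
      simp only [colProd, List.map_cons, List.foldl_cons, one_mul]
      calc (rows.map (fun r => r.getD i 0)).foldl (fun p v => p * v) (t.getD i 0)
          = (rows.map (fun r => r.getD i 0)).foldl (fun p v => p * v) (t.getD i 0 * 1) := by
            rw [mul_one]
        _ = t.getD i 0 * (rows.map (fun r => r.getD i 0)).foldl (fun p v => p * v) 1 :=
            foldl_mul_pull _ 1 _
    rw [hcol, mul_assoc]

theorem main_eq (data : List (String × List Int)) :
    get_index_wise_product_of_tuple_values data = get_index_wise_product_of_tuple_values_alt data := by
  unfold get_index_wise_product_of_tuple_values get_index_wise_product_of_tuple_values_alt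
  by_cases h : data.isEmpty
  · simp [h]
  · simp only [h, Bool.false_eq_true, if_false]
    have hne : data.map Prod.snd ≠ [] := by
      simpa using (by simpa [List.isEmpty_iff] using h : data ≠ [])
    set rows := data.map Prod.snd with hrows
    set n := pyMinList (rows.map List.length) with hn
    rw [zipCols_eq n rows hne rfl]
    rw [foldB n rows (List.replicate n 1) (by simp)]
    rw [List.map_map]
    apply List.map_congr_left
    intro i hi
    have hi' : i < n := List.mem_range.mp hi
    simp only [Function.comp_def, colProd]
    rw [List.getD_eq_getElem _ _ (by simpa using hi')]
    simp

-- ===== VERDICT (by name: the statement is the Claim_ definition above) =====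
theorem get_index_wise_product_of_tuple_values_spec : Claim_equal_get_index_wise_product_of_tuple_values := by
  intro data _
  unfold Spec_get_index_wise_product_of_tuple_values
  exact main_eq data
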